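-- pv_equiv track=rewrite | github.com/macnica0208/xiya-agent-dev | xiya_agent_v2/image/prompt_builder.py | _strip_nai_weight
-- ===== SOURCE A (Python) =====
-- def _strip_nai_weight(tag: str) -> str:
--     value = str(tag or "").strip()
--     while "::" in value:
--         prefix, rest = value.split("::", 1)
--         try:
--             float(prefix.strip())
--         except ValueError:
--             break
--         value = rest.strip()
--     while value.endswith("::"):
--         value = value[:-2].strip()
--     return value
-- ===== SOURCE B (Python) =====
-- def _strip_nai_weight(tag: str) -> str:
--     value = str(tag or "").strip()
--     # split once; walk an index over the leading float-parsable segments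
--     parts = value.split("::")
--     i = 0
--     while i < len(parts) - 1:
--         try:
--             float(parts[i].strip())
--         except ValueError:
--             break
--         i += 1
--     value = "::".join(parts[i:]).strip()
--     # trailing trim back-to-front: consume separator pairs and whitespace from a reversed copy
--     rev = value[::-1]
--     while rev.startswith("::"):
--         rev = rev[2:].lstrip()
--     return rev[::-1]
-- ===== Notes on version B (the rewrite author's own statement) =====
-- stated objective: alternative
-- what changed: A repeatedly rescans and re-splits the remaining string with split(sep, 1) and re-strips the remainder on every loop iteration, then peels trailing separator pairs by repeated endswith/slice/strip; B splits the string into all separator-delimited segments once, walks a single index over the leading float-parsable segments, rejoins/strips the chosen suffix once, and removes the trailing separator pairs by a single backward scan over the reversed string.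
import Mathlib
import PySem

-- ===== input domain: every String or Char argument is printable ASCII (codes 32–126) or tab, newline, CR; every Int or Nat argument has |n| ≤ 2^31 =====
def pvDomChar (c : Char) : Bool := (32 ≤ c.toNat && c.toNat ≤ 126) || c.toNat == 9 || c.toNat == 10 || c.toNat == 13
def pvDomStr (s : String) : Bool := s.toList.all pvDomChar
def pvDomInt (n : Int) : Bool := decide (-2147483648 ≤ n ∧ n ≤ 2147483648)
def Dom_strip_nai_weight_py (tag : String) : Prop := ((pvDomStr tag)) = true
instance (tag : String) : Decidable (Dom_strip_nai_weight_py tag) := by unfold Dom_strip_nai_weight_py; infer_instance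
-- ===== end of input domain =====

-- B replaces A's repeated split(sep, 1)/re-strip loop by one full split plus a single
-- forward index walk over the segments, and trims the trailing separator pairs by one
-- backward scan over the reversed string (a genuinely different decomposition; not
-- measurably faster on the tested inputs).

-- ===== PORT A =====
-- the literal separator "::"
def pvSep : List Char := [':', ':']

-- Hand port of CPython's float(str) VALIDITY test (does `float(x)` raise ValueError?),
-- exact for already-stripped ASCII input (A only calls it on `….strip()`): a recursive-descent
-- parser for [sign] (inf|infinity|nan (case-insensitive) | digits [. digits] | . digits)
-- [(e|E) [sign] digits], single underscores allowed between digits.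
def pyDigitsTail (cs : List Char) : List Char :=
  match cs with
  | c :: rest =>
    if c = '_' then
      match rest with
      | d :: rest2 => if PySem.Chars.isdigit d then pyDigitsTail rest2 else c :: rest
      | [] => c :: rest
    else if PySem.Chars.isdigit c then pyDigitsTail rest else c :: rest
  | [] => []
termination_by cs.length
decreasing_by all_goals simp [List.length_cons]

def pyEatDigits (cs : List Char) : List Char × Bool :=
  match cs with
  | c :: rest => if PySem.Chars.isdigit c then (pyDigitsTail rest, true) else (cs, false)
  | [] => ([], false)

def pyExpOk (cs : List Char) : Bool :=
  match cs with
  | [] => true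
  | e :: rest =>
    if e = 'e' ∨ e = 'E' then
      let rest2 := match rest with
        | s :: r => if s = '+' ∨ s = '-' then r else rest
        | [] => rest
      let (r, ok) := pyEatDigits rest2
      ok && r.isEmpty
    else false

def pyNumOk (cs : List Char) : Bool :=
  let (r1, g1) := pyEatDigits cs
  match r1 with
  | '.' :: r2 =>
    let (r3, g2) := pyEatDigits r2
    (g1 || g2) && pyExpOk r3
  | _ => g1 && pyExpOk r1

def pyFloatOk (cs : List Char) : Bool :=
  let body := match cs with
    | c :: r => if c = '+' ∨ c = '-' then r else cs
    | [] => cs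
  let low := PySem.Chars.lower body
  if low = "inf".toList ∨ low = "infinity".toList ∨ low = "nan".toList then true
  else pyNumOk body

-- while value.endswith("::"): value = value[:-2].strip()
-- (fuel only makes the loop total — each iteration shortens the list, so it is never exhausted)
def trailTrim (fuel : Nat) (value : List Char) : List Char :=
  match fuel with
  | 0 => value
  | fuel + 1 =>
    if PySem.Chars.endswith value pvSep then
      trailTrim fuel (PySem.Chars.strip (PySem.Chars.slice value none (some (-2))))
    else value

-- while "::" in value: prefix, rest = value.split("::", 1); if not float-ok: break; value = rest.strip()
-- (fuel only makes the loop total; every iteration strictly shortens value)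
def whileA (fuel : Nat) (value : List Char) : List Char :=
  match fuel with
  | 0 => value
  | fuel + 1 =>
    if PySem.Chars.isIn pvSep value then
      match PySem.Chars.splitOnMax value pvSep 1 with
      | [pre, rest] =>
        if pyFloatOk (PySem.Chars.strip pre) then whileA fuel (PySem.Chars.strip rest)
        else value
      | _ => value  -- unreachable: split(sep, 1) with sep present yields exactly two pieces
    else value

def strip_nai_weight_py (tag : String) : String :=
  let value := PySem.Chars.strip tag.toList          -- value = str(tag or "").strip()
  let v1 := whileA (value.length + 1) value          -- the leading while-loop
  let v2 := trailTrim (v1.length + 1) v1             -- the trailing while-loop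
  String.ofList v2

-- ===== PORT B =====
-- B-side port of the float(str) VALIDITY test: the same builtin, modelled this time as a
-- deterministic finite automaton over the characters (exact on the same stripped ASCII inputs).
inductive FSt where
  | S | I | IU | D0 | D1 | F | FU | E | ES | G | GU | B
deriving DecidableEq, Repr

def fstep (s : FSt) (c : Char) : FSt :=
  match s with
  | .S  => if PySem.Chars.isdigit c then .I else if c = '.' then .D0 else .B
  | .I  => if PySem.Chars.isdigit c then .I else if c = '_' then .IU
           else if c = '.' then .D1 else if c = 'e' ∨ c = 'E' then .E else .B
  | .IU => if PySem.Chars.isdigit c then .I else .B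
  | .D0 => if PySem.Chars.isdigit c then .F else .B
  | .D1 => if PySem.Chars.isdigit c then .F else if c = 'e' ∨ c = 'E' then .E else .B
  | .F  => if PySem.Chars.isdigit c then .F else if c = '_' then .FU
           else if c = 'e' ∨ c = 'E' then .E else .B
  | .FU => if PySem.Chars.isdigit c then .F else .B
  | .E  => if PySem.Chars.isdigit c then .G else if c = '+' ∨ c = '-' then .ES else .B
  | .ES => if PySem.Chars.isdigit c then .G else .B
  | .G  => if PySem.Chars.isdigit c then .G else if c = '_' then .GU else .B
  | .GU => if PySem.Chars.isdigit c then .G else .B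
  | .B  => .B

def faccept (s : FSt) : Bool :=
  match s with
  | .I | .D1 | .F | .G => true
  | _ => false

def numDFA (cs : List Char) : Bool := faccept (List.foldl fstep .S cs)

def floatDFA (cs : List Char) : Bool :=
  let body := match cs with
    | c :: r => if c = '+' ∨ c = '-' then r else cs
    | [] => cs
  let low := PySem.Chars.lower body
  if low = "inf".toList ∨ low = "infinity".toList ∨ low = "nan".toList then true
  else numDFA body

-- i = 0; while i < len(parts) - 1 and float-ok(parts[i].strip()): i += 1
def walkIdx (parts : List (List Char)) : Nat :=
  match parts with
  | p :: q :: rest => if floatDFA (PySem.Chars.strip p) then walkIdx (q :: rest) + 1 else 0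
  | _ => 0

-- rev = value[::-1]; while rev.startswith("::"): rev = rev[2:].lstrip()
def revTrim (rev : List Char) : List Char :=
  match rev with
  | ':' :: ':' :: rest => revTrim (List.dropWhile PySem.Chars.isspace rest)
  | l => l
termination_by rev.length
decreasing_by
  have := List.length_dropWhile_le PySem.Chars.isspace rest
  simp [List.length_cons]; omega

def strip_nai_weight_py_alt (tag : String) : String :=
  let value := PySem.Chars.strip tag.toList              -- value = str(tag or "").strip()
  let parts := PySem.Chars.splitOn value pvSep           -- parts = value.split("::")
  let i := walkIdx parts                                 -- the index walk
  let value2 := PySem.Chars.strip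
      (PySem.Chars.join pvSep (parts.drop i))            -- value = "::".join(parts[i:]).strip()
  String.ofList (revTrim value2.reverse).reverse         -- the backward trailing scan

-- ===== PRECONDITION & SPEC =====
def Spec_strip_nai_weight_py (tag : String) (out : String) : Prop := out = strip_nai_weight_py_alt tag
instance (tag : String) (out : String) : Decidable (Spec_strip_nai_weight_py tag out) := by unfold Spec_strip_nai_weight_py; infer_instance

-- ===== CLAIM (what is proved, stated in full; the proofs are below) =====
def Claim_equal_strip_nai_weight_py : Prop := ∀ (tag : String), Dom_strip_nai_weight_py tag → Spec_strip_nai_weight_py tag (strip_nai_weight_py tag)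

-- ===== LEMMAS AND PROOFS =====

-- ---- the two float-validity models agree ----

-- equation lemmas for pyDigitsTail
theorem pdt_u_digit {d : Char} (rest2 : List Char) (hd : PySem.Chars.isdigit d = true) :
    pyDigitsTail ('_' :: d :: rest2) = pyDigitsTail rest2 := by
  rw [pyDigitsTail.eq_def]; simp [hd]

theorem pdt_u_nondigit {d : Char} (rest2 : List Char) (hd : PySem.Chars.isdigit d = false) :
    pyDigitsTail ('_' :: d :: rest2) = '_' :: d :: rest2 := by
  rw [pyDigitsTail.eq_def]; simp [hd]

theorem pdt_u_nil : pyDigitsTail ['_'] = ['_'] := by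
  rw [pyDigitsTail.eq_def]; rfl

theorem pdt_digit {c : Char} (rest : List Char) (hne : c ≠ '_') (hd : PySem.Chars.isdigit c = true) :
    pyDigitsTail (c :: rest) = pyDigitsTail rest := by
  rw [pyDigitsTail.eq_def]; simp [hne, hd]

theorem pdt_nondigit {c : Char} (rest : List Char) (hne : c ≠ '_') (hd : PySem.Chars.isdigit c = false) :
    pyDigitsTail (c :: rest) = c :: rest := by
  rw [pyDigitsTail.eq_def]; simp [hne, hd]

theorem pdt_nil : pyDigitsTail [] = [] := by
  rw [pyDigitsTail.eq_def]

theorem runB_eq (l : List Char) : List.foldl fstep .B l = .B := by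
  induction l with
  | nil => rfl
  | cons c t ih => simpa [fstep] using ih

/-- the parser's digit-eating leaves a remainder that no digit (or digit-after-underscore) heads. -/
def StoppedAt (l : List Char) : Prop :=
  match l with
  | [] => True
  | c :: r => PySem.Chars.isdigit c = false ∧
      (c = '_' → (match r with | [] => True | d :: _ => PySem.Chars.isdigit d = false))

theorem stopped_tail (cs : List Char) : StoppedAt (pyDigitsTail cs) := by
  induction cs using pyDigitsTail.induct with
  | case1 d rest2 hd ih => rw [pdt_u_digit rest2 hd]; exact ih
  | case2 d rest2 hd =>
    rw [pdt_u_nondigit rest2 (by simpa using hd)]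
    exact ⟨by decide, fun _ => by simpa using hd⟩
  | case3 => rw [pdt_u_nil]; exact ⟨by decide, fun _ => trivial⟩
  | case4 d rest2 hne hd ih => rw [pdt_digit rest2 hne hd]; exact ih
  | case5 d rest2 hne hd =>
    rw [pdt_nondigit rest2 hne (by simpa using hd)]
    exact ⟨by simpa using hd, fun h => absurd h hne⟩
  | case6 => rw [pdt_nil]; trivial

theorem run_digits (s u : FSt)
    (hd : ∀ c, PySem.Chars.isdigit c = true → fstep s c = s)
    (hu : fstep s '_' = u)
    (hud : ∀ c, PySem.Chars.isdigit c = true → fstep u c = s) :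
    ∀ cs, List.foldl fstep s cs = List.foldl fstep s (pyDigitsTail cs) := by
  intro cs
  induction cs using pyDigitsTail.induct with
  | case1 d rest2 hdd ih =>
    have h1 : List.foldl fstep s ('_' :: d :: rest2) = List.foldl fstep s rest2 := by
      simp [List.foldl, hu, hud d hdd]
    rw [pdt_u_digit rest2 hdd, h1]; exact ih
  | case2 d rest2 hdd => rw [pdt_u_nondigit rest2 (by simpa using hdd)]
  | case3 => rw [pdt_u_nil]
  | case4 d rest2 hne hdd ih =>
    have h1 : List.foldl fstep s (d :: rest2) = List.foldl fstep s rest2 := by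
      simp [List.foldl, hd d hdd]
    rw [pdt_digit rest2 hne hdd, h1]; exact ih
  | case5 d rest2 hne hdd => rw [pdt_nondigit rest2 hne (by simpa using hdd)]
  | case6 => rw [pdt_nil]

theorem runI_tail (cs : List Char) :
    List.foldl fstep .I cs = List.foldl fstep .I (pyDigitsTail cs) :=
  run_digits .I .IU (fun c h => by simp [fstep, h])
    (by decide) (fun c h => by simp [fstep, h]) cs

theorem runF_tail (cs : List Char) :
    List.foldl fstep .F cs = List.foldl fstep .F (pyDigitsTail cs) :=
  run_digits .F .FU (fun c h => by simp [fstep, h])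
    (by decide) (fun c h => by simp [fstep, h]) cs

theorem runG_tail (cs : List Char) :
    List.foldl fstep .G cs = List.foldl fstep .G (pyDigitsTail cs) :=
  run_digits .G .GU (fun c h => by simp [fstep, h])
    (by decide) (fun c h => by simp [fstep, h]) cs

theorem isdigit_underscore : PySem.Chars.isdigit '_' = false := by decide

theorem accG (r : List Char) (hr : StoppedAt r) :
    faccept (List.foldl fstep .G r) = r.isEmpty := by
  cases r with
  | nil => rfl
  | cons c t =>
    obtain ⟨hcd, hcu⟩ := hr
    by_cases hc : c = '_'
    · subst hc
      cases t with
      | nil => simp [List.foldl, fstep, faccept, isdigit_underscore]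
      | cons d t' =>
        have hdd : PySem.Chars.isdigit d = false := by simpa using hcu rfl
        simp [List.foldl, fstep, hdd, runB_eq, faccept, isdigit_underscore]
    · simp [List.foldl, fstep, hcd, hc, runB_eq, faccept]

theorem pyExpOk_e_eq (c x : Char) (hc : c = 'e' ∨ c = 'E') (t' : List Char) :
    pyExpOk (c :: x :: t') = ((pyEatDigits (if x = '+' ∨ x = '-' then t' else x :: t')).2
      && (pyEatDigits (if x = '+' ∨ x = '-' then t' else x :: t')).1.isEmpty) := by
  rcases hE : pyEatDigits (if x = '+' ∨ x = '-' then t' else x :: t') with ⟨r, ok⟩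
  rw [pyExpOk.eq_def]
  rcases hc with h | h <;> subst h <;> simp [hE]

theorem expE_run (t : List Char) :
    faccept (List.foldl fstep .E t) = pyExpOk ('e' :: t) := by
  cases t with
  | nil => decide
  | cons x t' =>
    rw [pyExpOk_e_eq 'e' x (Or.inl rfl) t']
    by_cases hs : x = '+' ∨ x = '-'
    · rw [if_pos hs]
      have hxd : PySem.Chars.isdigit x = false := by
        rcases hs with h | h <;> subst h <;> decide
      cases t' with
      | nil => simp [List.foldl, fstep, hs, hxd, pyEatDigits, faccept]
      | cons y t'' =>
        by_cases hy : PySem.Chars.isdigit y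
        · have h1 : List.foldl fstep .E (x :: y :: t'') = List.foldl fstep .G t'' := by
            simp [List.foldl, fstep, hs, hxd, hy]
          rw [h1, runG_tail, accG _ (stopped_tail t'')]
          simp [pyEatDigits, hy]
        · simp [List.foldl, fstep, hs, hxd, hy, runB_eq, faccept, pyEatDigits]
    · rw [if_neg hs]
      by_cases hx : PySem.Chars.isdigit x
      · have h1 : List.foldl fstep .E (x :: t') = List.foldl fstep .G t' := by
          simp [List.foldl, fstep, hx]
        rw [h1, runG_tail, accG _ (stopped_tail t')]
        simp [pyEatDigits, hx]
      · simp [List.foldl, fstep, hx, hs, runB_eq, faccept, pyEatDigits]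

theorem expE_run' (t : List Char) :
    faccept (List.foldl fstep .E t) = pyExpOk ('E' :: t) := by
  cases t with
  | nil => decide
  | cons x t' =>
    rw [pyExpOk_e_eq 'E' x (Or.inr rfl) t', ← pyExpOk_e_eq 'e' x (Or.inl rfl) t']
    exact expE_run (x :: t')

theorem pyExpOk_not_e {c : Char} (t : List Char) (h1 : c ≠ 'e') (h2 : c ≠ 'E') :
    pyExpOk (c :: t) = false := by
  rw [pyExpOk.eq_def]; simp [h1, h2]


theorem accF_exp (r : List Char) (hr : StoppedAt r) :
    faccept (List.foldl fstep .F r) = pyExpOk r := by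
  cases r with
  | nil => rfl
  | cons c t =>
    obtain ⟨hcd, hcu⟩ := hr
    by_cases he : c = 'e' ∨ c = 'E'
    · have h1 : List.foldl fstep .F (c :: t) = List.foldl fstep .E t := by
        have hne : c ≠ '_' := by rcases he with h | h <;> subst h <;> decide
        simp [List.foldl, fstep, hcd, hne, he]
      rw [h1]
      rcases he with h | h
      · subst h; exact expE_run t
      · subst h; exact expE_run' t
    · rw [not_or] at he; obtain he := he
      rw [pyExpOk_not_e t he.1 he.2]
      by_cases hc : c = '_'
      · subst hc
        cases t with
        | nil => simp [List.foldl, fstep, faccept, isdigit_underscore]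
        | cons d t' =>
          have hdd : PySem.Chars.isdigit d = false := by simpa using hcu rfl
          simp [List.foldl, fstep, hdd, runB_eq, faccept, isdigit_underscore]
      · simp [List.foldl, fstep, hcd, hc, he.1, he.2, runB_eq, faccept]

theorem accD1_exp (r : List Char)
    (hr : match r with | [] => True | c :: _ => PySem.Chars.isdigit c = false) :
    faccept (List.foldl fstep .D1 r) = pyExpOk r := by
  cases r with
  | nil => rfl
  | cons c t =>
    have hcd : PySem.Chars.isdigit c = false := hr
    by_cases he : c = 'e' ∨ c = 'E'
    · have h1 : List.foldl fstep .D1 (c :: t) = List.foldl fstep .E t := by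
        simp [List.foldl, fstep, hcd, he]
      rw [h1]
      rcases he with h | h
      · subst h; exact expE_run t
      · subst h; exact expE_run' t
    · rw [not_or] at he; obtain he := he
      rw [pyExpOk_not_e t he.1 he.2]
      simp [List.foldl, fstep, hcd, he.1, he.2, runB_eq, faccept]

theorem accI_exp (r : List Char) (hr : StoppedAt r) (hdot : r.head? ≠ some '.') :
    faccept (List.foldl fstep .I r) = pyExpOk r := by
  cases r with
  | nil => rfl
  | cons c t =>
    obtain ⟨hcd, hcu⟩ := hr
    have hcdot : c ≠ '.' := by intro h; subst h; simp at hdot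
    by_cases he : c = 'e' ∨ c = 'E'
    · have h1 : List.foldl fstep .I (c :: t) = List.foldl fstep .E t := by
        have hne : c ≠ '_' := by rcases he with h | h <;> subst h <;> decide
        simp [List.foldl, fstep, hcd, hne, hcdot, he]
      rw [h1]
      rcases he with h | h
      · subst h; exact expE_run t
      · subst h; exact expE_run' t
    · rw [not_or] at he; obtain he := he
      rw [pyExpOk_not_e t he.1 he.2]
      by_cases hc : c = '_'
      · subst hc
        cases t with
        | nil => simp [List.foldl, fstep, faccept, isdigit_underscore]
        | cons d t' =>
          have hdd : PySem.Chars.isdigit d = false := by simpa using hcu rfl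
          simp [List.foldl, fstep, hdd, runB_eq, faccept, isdigit_underscore]
      · simp [List.foldl, fstep, hcd, hc, hcdot, he.1, he.2, runB_eq, faccept]

theorem pyNumOk_dot (cs r2 : List Char) (g1 : Bool) (h : pyEatDigits cs = ('.' :: r2, g1)) :
    pyNumOk cs = ((g1 || (pyEatDigits r2).2) && pyExpOk (pyEatDigits r2).1) := by
  rcases hE2 : pyEatDigits r2 with ⟨r3, g2⟩
  rw [pyNumOk, h]
  simp [hE2]

theorem pyNumOk_nodot (cs r1 : List Char) (g1 : Bool) (h : pyEatDigits cs = (r1, g1))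
    (hne : r1.head? ≠ some '.') : pyNumOk cs = (g1 && pyExpOk r1) := by
  rw [pyNumOk, h]
  split
  rename_i r ok heq
  rcases heq with ⟨rfl, rfl⟩
  split <;> simp_all

theorem numDFA_eq (cs : List Char) : numDFA cs = pyNumOk cs := by
  rw [numDFA]
  cases cs with
  | nil => decide
  | cons c t =>
    by_cases hc : PySem.Chars.isdigit c
    · have hEat : pyEatDigits (c :: t) = (pyDigitsTail t, true) := by simp [pyEatDigits, hc]
      have hSc : fstep .S c = .I := by simp [fstep, hc]
      have hL : List.foldl fstep .S (c :: t) = List.foldl fstep .I (pyDigitsTail t) := by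
        rw [List.foldl_cons, hSc]; exact runI_tail t
      have hst := stopped_tail t
      rcases hr1 : pyDigitsTail t with _ | ⟨c', r1'⟩
      · rw [hL, hr1, pyNumOk_nodot (c :: t) [] true (by rw [hEat, hr1]) (by simp)]
        decide
      · rw [hr1] at hst
        by_cases hdot : c' = '.'
        · subst hdot
          rw [hL, hr1, List.foldl_cons, (by decide : fstep .I '.' = .D1),
            pyNumOk_dot (c :: t) r1' true (by rw [hEat, hr1])]
          rcases r1' with _ | ⟨d, r2'⟩
          · decide
          · by_cases hd : PySem.Chars.isdigit d
            · have hDd : fstep .D1 d = .F := by simp [fstep, hd]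
              rw [List.foldl_cons, hDd, runF_tail, accF_exp _ (stopped_tail r2')]
              simp [pyEatDigits, hd]
            · rw [accD1_exp (d :: r2') (by simpa using hd)]
              simp [pyEatDigits, hd]
        · rw [hL, hr1, accI_exp (c' :: r1') hst (by simpa using hdot),
            pyNumOk_nodot (c :: t) (c' :: r1') true (by rw [hEat, hr1]) (by simpa using hdot)]
          simp
    · have hEat : pyEatDigits (c :: t) = (c :: t, false) := by simp [pyEatDigits, hc]
      by_cases hdot : c = '.'
      · subst hdot
        rw [pyNumOk_dot ('.' :: t) t false (by rw [hEat]),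
          List.foldl_cons, (by decide : fstep .S '.' = .D0)]
        rcases t with _ | ⟨d, t'⟩
        · decide
        · by_cases hd : PySem.Chars.isdigit d
          · have hD0 : fstep .D0 d = .F := by simp [fstep, hd]
            rw [List.foldl_cons, hD0, runF_tail, accF_exp _ (stopped_tail t')]
            simp [pyEatDigits, hd]
          · have hD0 : fstep .D0 d = .B := by simp [fstep, hd]
            rw [List.foldl_cons, hD0, runB_eq]
            simp [pyEatDigits, hd, faccept]
      · have hS : fstep .S c = .B := by simp [fstep, hc, hdot]
        rw [List.foldl_cons, hS, runB_eq,
          pyNumOk_nodot (c :: t) (c :: t) false (by rw [hEat]) (by simpa using hdot)]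
        simp [faccept]

theorem floatDFA_eq (cs : List Char) : floatDFA cs = pyFloatOk cs := by
  rw [floatDFA.eq_def, pyFloatOk.eq_def]
  simp only [numDFA_eq]

-- ---- a clean structural description of splitting at the FIRST "::" ----

/-- split `l` at the first occurrence of `"::"`: `some (before, after)`, or `none`. -/
def splitF : List Char → Option (List Char × List Char)
  | [] => none
  | c :: r =>
    if pvSep.isPrefixOf (c :: r) then some ([], r.drop 1)
    else (splitF r).map fun pr => (c :: pr.1, pr.2)

theorem sep_prefix_iff (l : List Char) : pvSep.isPrefixOf l = true ↔ ∃ t, l = ':' :: ':' :: t := by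
  match l with
  | [] => simp [pvSep, List.isPrefixOf]
  | [a] => simp [pvSep, List.isPrefixOf]
  | a :: b :: t =>
    simp only [pvSep, List.isPrefixOf, List.isPrefixOf_nil_left, Bool.and_true, Bool.and_eq_true,
      beq_iff_eq]
    constructor
    · rintro ⟨rfl, rfl, -⟩; exact ⟨t, rfl⟩
    · rintro ⟨t', ht⟩; cases ht; simp

theorem splitF_append : ∀ {l p q : List Char}, splitF l = some (p, q) → l = p ++ pvSep ++ q := by
  intro l
  induction l with
  | nil => intro p q h; simp [splitF] at h
  | cons c r ih =>
    intro p q h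
    by_cases hp : pvSep.isPrefixOf (c :: r)
    · obtain ⟨t, ht⟩ := (sep_prefix_iff _).1 hp
      cases ht
      simp [splitF, hp] at h
      obtain ⟨rfl, rfl⟩ := h
      rfl
    · rw [splitF, if_neg hp] at h
      rw [Option.map_eq_some_iff] at h
      obtain ⟨⟨p', q'⟩, hsf, hpq⟩ := h
      obtain ⟨rfl, rfl⟩ : c :: p' = p ∧ q' = q := by
        simpa using congrArg (fun z => (z.1, z.2)) hpq
      simpa using congrArg (c :: ·) (ih hsf)

theorem splitF_lt {l p q : List Char} (h : splitF l = some (p, q)) : q.length < l.length := by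
  have := splitF_append h
  subst this
  simp [pvSep]
  omega

/-- the full split by "::" as Python's `value.split("::")` computes it. -/
def mySplit (l : List Char) : List (List Char) :=
  match h : splitF l with
  | none => [l]
  | some (p, q) => p :: mySplit q
termination_by l.length
decreasing_by exact splitF_lt h

theorem mySplit_of_none {l : List Char} (h : splitF l = none) : mySplit l = [l] := by
  unfold mySplit; split <;> simp_all

theorem mySplit_of_some {l p q : List Char} (h : splitF l = some (p, q)) :
    mySplit l = p :: mySplit q := by
  conv_lhs => rw [mySplit]
  split <;> simp_all

theorem mySplit_ne_nil (l : List Char) : mySplit l ≠ [] := by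
  cases h : splitF l with
  | none => rw [mySplit_of_none h]; simp
  | some pr => rw [mySplit_of_some (p := pr.1) (q := pr.2) (by simpa using h)]; simp

theorem join_mySplit (l : List Char) : PySem.Chars.join pvSep (mySplit l) = l := by
  induction l using mySplit.induct with
  | case1 l h => rw [mySplit_of_none h]; simp [PySem.Chars.join_singleton]
  | case2 l p q h ih =>
    rw [mySplit_of_some h]
    rcases hm : mySplit q with _ | ⟨m, ms⟩
    · exact absurd hm (mySplit_ne_nil q)
    · rw [PySem.Chars.join_cons_cons, ← hm, ih, splitF_append h, List.append_assoc]

theorem splitF_isSome_of_infix : ∀ {v : List Char}, pvSep <:+: v → (splitF v).isSome = true := by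
  intro v
  induction v with
  | nil => intro h; simp [pvSep] at h
  | cons c r ih =>
    intro h
    by_cases hp : pvSep.isPrefixOf (c :: r)
    · simp [splitF, hp]
    · obtain ⟨s, t, hst⟩ := h
      rcases s with _ | ⟨a, s'⟩
      · exact absurd ((sep_prefix_iff _).2 ⟨t, by simpa [pvSep] using hst.symm⟩) hp
      · simp only [List.cons_append] at hst
        have hr : pvSep <:+: r := ⟨s', t, (by simpa using hst : a = c ∧ s' ++ pvSep ++ t = r).2⟩
        have := ih hr
        simp only [splitF, hp, if_false]
        cases hsf : splitF r with
        | none => rw [hsf] at this; simp at this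
        | some pr => simp

theorem isIn_eq_isSome (v : List Char) : PySem.Chars.isIn pvSep v = (splitF v).isSome := by
  cases hsf : splitF v with
  | none =>
    simp only [Option.isSome_none]
    rw [PySem.Chars.isIn_eq_false_iff]
    intro hin
    have := splitF_isSome_of_infix hin
    rw [hsf] at this; simp at this
  | some pr =>
    obtain ⟨p, q⟩ := pr
    simp only [Option.isSome_some]
    rw [PySem.Chars.isIn_iff_infix]
    exact ⟨p, q, (splitF_append hsf).symm⟩

-- ---- the library split functions compute mySplit / the first-split pair ----

theorem splitOn_go_eq (fuel : Nat) : ∀ (l cur : List Char) (acc : List (List Char)),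
    l.length < fuel →
    PySem.Chars.splitOn.go pvSep fuel l cur acc
      = acc.reverse ++ (mySplit l).modifyHead (cur.reverse ++ ·) := by
  induction fuel with
  | zero => intro l cur acc h; omega
  | succ fuel ih =>
    intro l cur acc hl
    cases l with
    | nil =>
      rw [PySem.Chars.splitOn.go.eq_def]
      rw [mySplit_of_none (by rfl)]
      simp
    | cons c r =>
      rw [PySem.Chars.splitOn.go.eq_def]
      simp only []
      by_cases hp : pvSep.isPrefixOf (c :: r)
      · rw [if_pos hp]
        obtain ⟨t, ht⟩ := (sep_prefix_iff _).1 hp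
        cases ht
        have hsf : splitF (':' :: ':' :: t) = some ([], t) := by simp [splitF, hp]
        rw [mySplit_of_some hsf]
        have hdrop : List.drop pvSep.length (':' :: ':' :: t) = t := by simp [pvSep]
        rw [hdrop, ih t [] (cur.reverse :: acc) (by simp at hl ⊢; omega)]
        rcases hm : mySplit t with _ | ⟨m, ms⟩
        · exact absurd hm (mySplit_ne_nil t)
        · simp
      · rw [if_neg hp]
        rw [ih r (c :: cur) acc (by simp at hl ⊢; omega)]
        cases hsf : splitF r with
        | none =>
          have : splitF (c :: r) = none := by simp [splitF, hp, hsf]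
          rw [mySplit_of_none this, mySplit_of_none hsf]
          simp
        | some pr =>
          obtain ⟨p, q⟩ := pr
          have : splitF (c :: r) = some (c :: p, q) := by simp [splitF, hp, hsf]
          rw [mySplit_of_some this, mySplit_of_some hsf]
          simp

theorem splitOn_eq_mySplit (v : List Char) : PySem.Chars.splitOn v pvSep = mySplit v := by
  rw [PySem.Chars.splitOn, splitOn_go_eq (v.length + 1) v [] [] (by omega)]
  rcases hm : mySplit v with _ | ⟨m, ms⟩
  · exact absurd hm (mySplit_ne_nil v)
  · simp

theorem splitOnMax_go_zero (fuel : Nat) (l cur : List Char) (acc : List (List Char)) :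
    PySem.Chars.splitOnMax.go pvSep fuel 0 l cur acc = acc.reverse ++ [cur.reverse ++ l] := by
  cases fuel with
  | zero => rw [PySem.Chars.splitOnMax.go.eq_def]; simp
  | succ fuel =>
    cases l with
    | nil => rw [PySem.Chars.splitOnMax.go.eq_def]; simp
    | cons c r => rw [PySem.Chars.splitOnMax.go.eq_def]; simp

theorem splitOnMax_go_one (fuel : Nat) : ∀ (l cur : List Char) (acc : List (List Char)),
    l.length < fuel →
    PySem.Chars.splitOnMax.go pvSep fuel 1 l cur acc
      = acc.reverse ++ (match splitF l with
          | none => [cur.reverse ++ l]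
          | some (p, q) => [cur.reverse ++ p, q]) := by
  induction fuel with
  | zero => intro l cur acc h; omega
  | succ fuel ih =>
    intro l cur acc hl
    cases l with
    | nil =>
      rw [PySem.Chars.splitOnMax.go.eq_def]
      show (cur.reverse :: acc).reverse = _
      have : splitF ([] : List Char) = none := rfl
      rw [this]
      simp
    | cons c r =>
      rw [PySem.Chars.splitOnMax.go.eq_def]
      simp only []
      rw [if_neg (by omega : ¬ (1 : Nat) = 0)]
      by_cases hp : pvSep.isPrefixOf (c :: r)
      · rw [if_pos hp]
        obtain ⟨t, ht⟩ := (sep_prefix_iff _).1 hp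
        cases ht
        have hsf : splitF (':' :: ':' :: t) = some ([], t) := by simp [splitF, hp]
        have hdrop : List.drop pvSep.length (':' :: ':' :: t) = t := by simp [pvSep]
        rw [hdrop, hsf]
        show PySem.Chars.splitOnMax.go pvSep fuel 0 t [] (cur.reverse :: acc) = _
        rw [splitOnMax_go_zero]
        simp
      · rw [if_neg hp]
        rw [ih r (c :: cur) acc (by simp at hl ⊢; omega)]
        cases hsf : splitF r with
        | none =>
          have h2 : splitF (c :: r) = none := by simp [splitF, hp, hsf]
          rw [h2]
          simp
        | some pr =>
          obtain ⟨p, q⟩ := pr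
          have h2 : splitF (c :: r) = some (c :: p, q) := by simp [splitF, hp, hsf]
          rw [h2]
          simp

theorem splitOnMax_one {v p q : List Char} (h : splitF v = some (p, q)) :
    PySem.Chars.splitOnMax v pvSep 1 = [p, q] := by
  rw [PySem.Chars.splitOnMax]
  rw [if_neg (by omega : ¬ (1 : Int) < 0)]
  show PySem.Chars.splitOnMax.go pvSep (v.length + 1) 1 v [] [] = _
  rw [splitOnMax_go_one (v.length + 1) v [] [] (by omega), h]
  simp

-- ---- whitespace-stripping toolbox ----

theorem lstrip_cons (c : Char) (t : List Char) :
    PySem.Chars.lstrip (c :: t) = if PySem.Chars.isspace c then PySem.Chars.lstrip t else c :: t := by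
  simp [PySem.Chars.lstrip, List.dropWhile_cons]

theorem rstrip_cons (c : Char) (t : List Char) :
    PySem.Chars.rstrip (c :: t)
      = if PySem.Chars.rstrip t = [] then (if PySem.Chars.isspace c then [] else [c])
        else c :: PySem.Chars.rstrip t := by
  simp only [PySem.Chars.rstrip, List.reverse_cons, List.dropWhile_append]
  by_cases h0 : List.dropWhile PySem.Chars.isspace t.reverse = []
  · simp [h0, List.dropWhile_cons]
    by_cases hc : PySem.Chars.isspace c <;> simp [hc]
  · simp [h0, List.isEmpty_iff, List.reverse_eq_nil_iff]

theorem rstrip_eq_nil_iff (t : List Char) :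
    PySem.Chars.rstrip t = [] ↔ ∀ c ∈ t, PySem.Chars.isspace c = true := by
  simp [PySem.Chars.rstrip, List.reverse_eq_nil_iff, List.dropWhile_eq_nil_iff]

theorem rstrip_cons_nonspace {c : Char} (h : PySem.Chars.isspace c = false) (t : List Char) :
    PySem.Chars.rstrip (c :: t) = c :: PySem.Chars.rstrip t := by
  rw [rstrip_cons]
  by_cases h0 : PySem.Chars.rstrip t = [] <;> simp [h0, h]

theorem dropWhile_idem (p : Char → Bool) (s : List Char) :
    List.dropWhile p (List.dropWhile p s) = List.dropWhile p s := by
  induction s with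
  | nil => simp
  | cons c t ih =>
    by_cases hc : p c
    · simp [List.dropWhile_cons, hc, ih]
    · simp [List.dropWhile_cons, hc]

theorem lstrip_idem (s : List Char) : PySem.Chars.lstrip (PySem.Chars.lstrip s) = PySem.Chars.lstrip s := by
  simp [PySem.Chars.lstrip, dropWhile_idem]

theorem rstrip_idem (s : List Char) : PySem.Chars.rstrip (PySem.Chars.rstrip s) = PySem.Chars.rstrip s := by
  simp [PySem.Chars.rstrip, dropWhile_idem]

theorem lstrip_rstrip_comm (x : List Char) :
    PySem.Chars.lstrip (PySem.Chars.rstrip x) = PySem.Chars.rstrip (PySem.Chars.lstrip x) := by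
  induction x with
  | nil => simp [PySem.Chars.lstrip, PySem.Chars.rstrip]
  | cons c t ih =>
    by_cases hc : PySem.Chars.isspace c
    · rw [lstrip_cons, if_pos hc, rstrip_cons]
      by_cases h0 : PySem.Chars.rstrip t = []
      · rw [if_pos h0, if_pos hc]
        have ht : ∀ a ∈ t, PySem.Chars.isspace a = true := (rstrip_eq_nil_iff t).1 h0
        have : PySem.Chars.rstrip (PySem.Chars.lstrip t) = [] := by
          rw [rstrip_eq_nil_iff]
          intro a ha
          have hsub : PySem.Chars.lstrip t <:+ t := by
            simpa [PySem.Chars.lstrip] using List.dropWhile_suffix (l := t) PySem.Chars.isspace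
          exact ht a (hsub.subset ha)
        rw [this, PySem.Chars.lstrip]
        simp
      · rw [if_neg h0, lstrip_cons, if_pos hc, ih]
    · have hcf : PySem.Chars.isspace c = false := by simpa using hc
      rw [rstrip_cons_nonspace hcf, lstrip_cons, if_neg hc, lstrip_cons, if_neg hc,
        rstrip_cons_nonspace hcf]

theorem strip_idem (s : List Char) : PySem.Chars.strip (PySem.Chars.strip s) = PySem.Chars.strip s := by
  simp only [PySem.Chars.strip]
  rw [lstrip_rstrip_comm, rstrip_idem, lstrip_idem]

theorem strip_lstrip (x : List Char) : PySem.Chars.strip (PySem.Chars.lstrip x) = PySem.Chars.strip x := by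
  simp only [PySem.Chars.strip, lstrip_idem]

theorem strip_rstrip (x : List Char) : PySem.Chars.strip (PySem.Chars.rstrip x) = PySem.Chars.strip x := by
  simp only [PySem.Chars.strip]
  rw [lstrip_rstrip_comm, rstrip_idem]

theorem strip_length_le (v : List Char) : (PySem.Chars.strip v).length ≤ v.length := by
  simp only [PySem.Chars.strip, PySem.Chars.rstrip, PySem.Chars.lstrip, List.length_reverse]
  calc (List.dropWhile PySem.Chars.isspace (List.dropWhile PySem.Chars.isspace v).reverse).length
      ≤ (List.dropWhile PySem.Chars.isspace v).reverse.length := List.length_dropWhile_le _ _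
    _ ≤ v.length := by simpa using List.length_dropWhile_le PySem.Chars.isspace v

theorem rstrip_prefix (t : List Char) : PySem.Chars.rstrip t <+: t := by
  have h := List.dropWhile_suffix (l := t.reverse) PySem.Chars.isspace
  have := List.reverse_prefix (l₁ := PySem.Chars.rstrip t) (l₂ := t)
  rw [PySem.Chars.rstrip]
  obtain ⟨s, hs⟩ := h
  exact ⟨s.reverse, by rw [← List.reverse_append, hs, List.reverse_reverse]⟩

theorem lstrip_append_colon (x t : List Char) :
    PySem.Chars.lstrip (x ++ ':' :: t) = PySem.Chars.lstrip x ++ ':' :: t := by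
  simp only [PySem.Chars.lstrip, List.dropWhile_append]
  by_cases h0 : List.dropWhile PySem.Chars.isspace x = []
  · simp [h0, List.dropWhile_cons, (by decide : PySem.Chars.isspace ':' = false)]
  · simp [h0, List.isEmpty_iff]

theorem rstrip_append (x y : List Char) :
    PySem.Chars.rstrip (x ++ y)
      = if PySem.Chars.rstrip y = [] then PySem.Chars.rstrip x else x ++ PySem.Chars.rstrip y := by
  simp only [PySem.Chars.rstrip, List.reverse_append, List.dropWhile_append]
  by_cases h0 : List.dropWhile PySem.Chars.isspace y.reverse = []
  · simp [h0, List.reverse_eq_nil_iff]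
  · simp [h0, List.isEmpty_iff, List.reverse_eq_nil_iff, List.reverse_append]

theorem rstrip_sep_append (t : List Char) :
    PySem.Chars.rstrip (pvSep ++ t) = pvSep ++ PySem.Chars.rstrip t := by
  rw [rstrip_append]
  by_cases h0 : PySem.Chars.rstrip t = []
  · rw [if_pos h0, h0]
    decide
  · rw [if_neg h0]

-- ---- stripping commutes with splitting (off the first / last segment) ----

theorem splitF_lstrip (u : List Char) :
    splitF (PySem.Chars.lstrip u) = (splitF u).map fun pr => (PySem.Chars.lstrip pr.1, pr.2) := by
  induction u with
  | nil => simp [PySem.Chars.lstrip, splitF]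
  | cons c r ih =>
    by_cases hc : PySem.Chars.isspace c
    · have hp : pvSep.isPrefixOf (c :: r) = false := by
        apply Bool.eq_false_iff.2; intro h
        obtain ⟨t, ht⟩ := (sep_prefix_iff _).1 h
        cases ht
        exact absurd hc (by decide)
      rw [lstrip_cons, if_pos hc, ih]
      cases hsf : splitF r with
      | none =>
        have h2 : splitF (c :: r) = none := by simp [splitF, hp, hsf]
        rw [h2]
      | some pr =>
        obtain ⟨p, q⟩ := pr
        have h2 : splitF (c :: r) = some (c :: p, q) := by simp [splitF, hp, hsf]
        rw [h2]
        simp [lstrip_cons, hc]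
    · rw [lstrip_cons, if_neg hc]
      by_cases hp : pvSep.isPrefixOf (c :: r) = true
      · have h2 : splitF (c :: r) = some ([], r.drop 1) := by simp [splitF, hp]
        rw [h2]
        simp [PySem.Chars.lstrip]
      · cases hsf : splitF r with
        | none =>
          have h2 : splitF (c :: r) = none := by simp [splitF, hp, hsf]
          rw [h2]
          rfl
        | some pr =>
          obtain ⟨p, q⟩ := pr
          have h2 : splitF (c :: r) = some (c :: p, q) := by simp [splitF, hp, hsf]
          rw [h2]
          simp [lstrip_cons, hc]

theorem sep_prefix_rstrip {c : Char} {r : List Char}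
    (h : pvSep.isPrefixOf (c :: PySem.Chars.rstrip r) = true) :
    pvSep.isPrefixOf (c :: r) = true := by
  obtain ⟨t, ht⟩ := (sep_prefix_iff _).1 h
  have hc : c = ':' := by
    have := congrArg (fun l => l.head?) ht
    simpa using this
  have hr : PySem.Chars.rstrip r = ':' :: t := by
    have := congrArg (fun l => l.tail) ht
    simpa using this
  obtain ⟨k, hk⟩ := rstrip_prefix r
  rw [sep_prefix_iff]
  exact ⟨t ++ k, by rw [hc, ← hk, hr]; simp⟩

theorem splitF_rstrip (u : List Char) :
    splitF (PySem.Chars.rstrip u) = (splitF u).map fun pr => (pr.1, PySem.Chars.rstrip pr.2) := by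
  induction u with
  | nil => simp [PySem.Chars.rstrip, splitF]
  | cons c r ih =>
    by_cases hp : pvSep.isPrefixOf (c :: r) = true
    · obtain ⟨t, ht⟩ := (sep_prefix_iff _).1 hp
      cases ht
      have h2 : splitF (':' :: ':' :: t) = some ([], t) := by simp [splitF, hp]
      rw [h2]
      rw [rstrip_cons_nonspace (by decide), rstrip_cons_nonspace (by decide)]
      have hp2 : pvSep.isPrefixOf (':' :: ':' :: PySem.Chars.rstrip t) = true := by
        rw [sep_prefix_iff]; exact ⟨_, rfl⟩
      simp [splitF, hp2]
    · cases hsf : splitF r with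
      | none =>
        have h2 : splitF (c :: r) = none := by simp [splitF, hp, hsf]
        rw [h2]
        by_cases h0 : PySem.Chars.rstrip r = []
        · rw [rstrip_cons, if_pos h0]
          have hone : splitF [c] = none := by
            have hpc : pvSep.isPrefixOf [c] = false := by
              apply Bool.eq_false_iff.2; intro h
              obtain ⟨t, ht⟩ := (sep_prefix_iff _).1 h
              simp at ht
            simp [splitF, hpc]
          by_cases hc : PySem.Chars.isspace c <;> simp [hc, splitF, hone]
        · rw [rstrip_cons, if_neg h0]
          have hp2 : pvSep.isPrefixOf (c :: PySem.Chars.rstrip r) = false := by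
            apply Bool.eq_false_iff.2; intro h
            exact absurd (sep_prefix_rstrip h) hp
          have h3 : splitF (PySem.Chars.rstrip r) = none := by rw [ih, hsf]; rfl
          simp [splitF, hp2, h3]
      | some pr =>
        obtain ⟨p, q⟩ := pr
        have h2 : splitF (c :: r) = some (c :: p, q) := by simp [splitF, hp, hsf]
        rw [h2]
        have h0 : PySem.Chars.rstrip r ≠ [] := by
          rw [Ne, rstrip_eq_nil_iff]
          intro hall
          have : (':' : Char) ∈ r := by
            rw [splitF_append hsf]; simp [pvSep]
          exact absurd (hall ':' this) (by decide)
        rw [rstrip_cons, if_neg h0]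
        have hp2 : pvSep.isPrefixOf (c :: PySem.Chars.rstrip r) = false := by
          apply Bool.eq_false_iff.2; intro h
          exact absurd (sep_prefix_rstrip h) hp
        have h3 : splitF (PySem.Chars.rstrip r) = some (p, PySem.Chars.rstrip q) := by
          rw [ih, hsf]; rfl
        simp [splitF, hp2, h3]

theorem mySplit_lstrip (u : List Char) :
    mySplit (PySem.Chars.lstrip u) = (mySplit u).modifyHead PySem.Chars.lstrip := by
  cases hsf : splitF u with
  | none =>
    have h2 : splitF (PySem.Chars.lstrip u) = none := by rw [splitF_lstrip, hsf]; rfl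
    rw [mySplit_of_none h2, mySplit_of_none hsf]
    rfl
  | some pr =>
    obtain ⟨p, q⟩ := pr
    have h2 : splitF (PySem.Chars.lstrip u) = some (PySem.Chars.lstrip p, q) := by
      rw [splitF_lstrip, hsf]; rfl
    rw [mySplit_of_some h2, mySplit_of_some hsf]
    rfl

/-- modify the LAST element of a list of segments. -/
def mLast (f : List Char → List Char) : List (List Char) → List (List Char)
  | [] => []
  | [q] => [f q]
  | q :: x :: Q => q :: mLast f (x :: Q)

theorem mySplit_rstrip (u : List Char) :
    mySplit (PySem.Chars.rstrip u) = mLast PySem.Chars.rstrip (mySplit u) := by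
  induction u using mySplit.induct with
  | case1 u h =>
    have h2 : splitF (PySem.Chars.rstrip u) = none := by rw [splitF_rstrip, h]; rfl
    rw [mySplit_of_none h2, mySplit_of_none h]
    rfl
  | case2 u p q h ih =>
    have h2 : splitF (PySem.Chars.rstrip u) = some (p, PySem.Chars.rstrip q) := by
      rw [splitF_rstrip, h]; rfl
    rw [mySplit_of_some h2, ih, mySplit_of_some h]
    rcases hm : mySplit q with _ | ⟨m, ms⟩
    · exact absurd hm (mySplit_ne_nil q)
    · rfl

-- ---- the index walk, as a suffix of the segment list ----

/-- the suffix of the segment list left after B's index walk (= parts[i:]). -/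
def dropNumeric : List (List Char) → List (List Char)
  | p :: q :: rest =>
      if pyFloatOk (PySem.Chars.strip p) then dropNumeric (q :: rest) else p :: q :: rest
  | l => l

theorem mLast_cons_ne_nil (f : List Char → List Char) (x : List Char) (t : List (List Char)) :
    mLast f (x :: t) ≠ [] := by
  cases t <;> simp [mLast]

theorem drop_walkIdx (P : List (List Char)) : P.drop (walkIdx P) = dropNumeric P := by
  induction P with
  | nil => rfl
  | cons p P ih =>
    cases P with
    | nil => rfl
    | cons q rest =>
      by_cases hf : pyFloatOk (PySem.Chars.strip p)
      · simp only [walkIdx, dropNumeric, floatDFA_eq, hf, if_true, List.drop_succ_cons]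
        exact ih
      · simp [walkIdx, dropNumeric, floatDFA_eq, hf]

theorem dropNumeric_mLast (P : List (List Char)) :
    dropNumeric (mLast PySem.Chars.rstrip P) = mLast PySem.Chars.rstrip (dropNumeric P) := by
  induction P with
  | nil => rfl
  | cons p P ih =>
    cases P with
    | nil => rfl
    | cons q rest =>
      show dropNumeric (p :: mLast PySem.Chars.rstrip (q :: rest)) = _
      rcases hm : mLast PySem.Chars.rstrip (q :: rest) with _ | ⟨b, B⟩
      · exact absurd hm (mLast_cons_ne_nil _ _ _)
      · by_cases hf : pyFloatOk (PySem.Chars.strip p)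
        · show (if pyFloatOk (PySem.Chars.strip p) then dropNumeric (b :: B)
              else p :: b :: B) = _
          rw [if_pos hf, ← hm, ih]
          show _ = mLast PySem.Chars.rstrip
            (if pyFloatOk (PySem.Chars.strip p) then dropNumeric (q :: rest) else p :: q :: rest)
          rw [if_pos hf]
        · show (if pyFloatOk (PySem.Chars.strip p) then dropNumeric (b :: B)
              else p :: b :: B) = _
          rw [if_neg hf, ← hm]
          show _ = mLast PySem.Chars.rstrip
            (if pyFloatOk (PySem.Chars.strip p) then dropNumeric (q :: rest) else p :: q :: rest)
          rw [if_neg hf]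
          rfl

theorem join_modifyHead (P : List (List Char)) :
    PySem.Chars.join pvSep (P.modifyHead PySem.Chars.lstrip)
      = PySem.Chars.lstrip (PySem.Chars.join pvSep P) := by
  cases P with
  | nil => simp [PySem.Chars.join_nil, PySem.Chars.lstrip]
  | cons p P =>
    cases P with
    | nil => simp [PySem.Chars.join_singleton, List.modifyHead]
    | cons q rest =>
      show PySem.Chars.join pvSep (PySem.Chars.lstrip p :: q :: rest) = _
      rw [PySem.Chars.join_cons_cons, PySem.Chars.join_cons_cons]
      have : p ++ pvSep ++ PySem.Chars.join pvSep (q :: rest)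
          = p ++ ':' :: (':' :: PySem.Chars.join pvSep (q :: rest)) := by simp [pvSep]
      rw [this, lstrip_append_colon]
      simp [pvSep]

theorem join_mLast (P : List (List Char)) :
    PySem.Chars.join pvSep (mLast PySem.Chars.rstrip P)
      = PySem.Chars.rstrip (PySem.Chars.join pvSep P) := by
  induction P with
  | nil => simp [mLast, PySem.Chars.join_nil, PySem.Chars.rstrip]
  | cons q P ih =>
    cases P with
    | nil => simp [mLast, PySem.Chars.join_singleton]
    | cons x t =>
      show PySem.Chars.join pvSep (q :: mLast PySem.Chars.rstrip (x :: t)) = _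
      rcases hm : mLast PySem.Chars.rstrip (x :: t) with _ | ⟨b, B⟩
      · exact absurd hm (mLast_cons_ne_nil _ _ _)
      · rw [PySem.Chars.join_cons_cons, ← hm, ih, PySem.Chars.join_cons_cons,
          show q ++ pvSep ++ PySem.Chars.join pvSep (x :: t)
              = q ++ (pvSep ++ PySem.Chars.join pvSep (x :: t)) from List.append_assoc q pvSep _,
          rstrip_append q (pvSep ++ PySem.Chars.join pvSep (x :: t)), rstrip_sep_append]
        simp [pvSep]

theorem strip_join_dropNumeric_modifyHead (P : List (List Char)) :
    PySem.Chars.strip (PySem.Chars.join pvSep (dropNumeric (P.modifyHead PySem.Chars.lstrip)))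
      = PySem.Chars.strip (PySem.Chars.join pvSep (dropNumeric P)) := by
  cases P with
  | nil => rfl
  | cons p P =>
    cases P with
    | nil =>
      have h1 : dropNumeric [PySem.Chars.lstrip p] = [PySem.Chars.lstrip p] := rfl
      have h2 : dropNumeric [p] = [p] := rfl
      show PySem.Chars.strip (PySem.Chars.join pvSep (dropNumeric [PySem.Chars.lstrip p])) = _
      rw [h1, h2, PySem.Chars.join_singleton, PySem.Chars.join_singleton, strip_lstrip]
    | cons q rest =>
      show PySem.Chars.strip (PySem.Chars.join pvSep
        (if pyFloatOk (PySem.Chars.strip (PySem.Chars.lstrip p)) then dropNumeric (q :: rest)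
         else PySem.Chars.lstrip p :: q :: rest)) = _
      rw [strip_lstrip]
      by_cases hf : pyFloatOk (PySem.Chars.strip p)
      · rw [if_pos hf]
        show _ = PySem.Chars.strip (PySem.Chars.join pvSep
          (if pyFloatOk (PySem.Chars.strip p) then dropNumeric (q :: rest) else p :: q :: rest))
        rw [if_pos hf]
      · rw [if_neg hf]
        show _ = PySem.Chars.strip (PySem.Chars.join pvSep
          (if pyFloatOk (PySem.Chars.strip p) then dropNumeric (q :: rest) else p :: q :: rest))
        rw [if_neg hf]
        have : PySem.Chars.lstrip p :: q :: rest = (p :: q :: rest).modifyHead PySem.Chars.lstrip := rfl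
        rw [this, join_modifyHead, strip_lstrip]

theorem strip_join_dropNumeric_mLast (Q : List (List Char)) :
    PySem.Chars.strip (PySem.Chars.join pvSep (dropNumeric (mLast PySem.Chars.rstrip Q)))
      = PySem.Chars.strip (PySem.Chars.join pvSep (dropNumeric Q)) := by
  rw [dropNumeric_mLast, join_mLast, strip_rstrip]

theorem strip_invariant (r : List Char) :
    PySem.Chars.strip (PySem.Chars.join pvSep (dropNumeric (mySplit (PySem.Chars.strip r))))
      = PySem.Chars.strip (PySem.Chars.join pvSep (dropNumeric (mySplit r))) := by
  show PySem.Chars.strip (PySem.Chars.join pvSep (dropNumeric (mySplit (PySem.Chars.rstrip (PySem.Chars.lstrip r))))) = _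
  rw [mySplit_rstrip, mySplit_lstrip, strip_join_dropNumeric_mLast, strip_join_dropNumeric_modifyHead]

-- ---- A's loop computes B's split-walk-join-strip value ----

theorem whileA_eq : ∀ (fuel : Nat) (v : List Char), v.length < fuel → PySem.Chars.strip v = v →
    whileA fuel v
      = PySem.Chars.strip (PySem.Chars.join pvSep (dropNumeric (mySplit v))) := by
  intro fuel
  induction fuel with
  | zero => intro v h _; omega
  | succ fuel ih =>
    intro v hlen hs
    cases hsf : splitF v with
    | none =>
      have hin : PySem.Chars.isIn pvSep v = false := by rw [isIn_eq_isSome, hsf]; rfl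
      rw [whileA]
      rw [mySplit_of_none hsf]
      have hd : dropNumeric [v] = [v] := rfl
      rw [hd, PySem.Chars.join_singleton, hs]
      simp [hin]
    | some pr =>
      obtain ⟨p, q⟩ := pr
      have hin : PySem.Chars.isIn pvSep v = true := by rw [isIn_eq_isSome, hsf]; rfl
      rw [whileA]
      simp only [hin, if_true, splitOnMax_one hsf]
      rw [mySplit_of_some hsf]
      rcases hm : mySplit q with _ | ⟨m, ms⟩
      · exact absurd hm (mySplit_ne_nil q)
      by_cases hf : pyFloatOk (PySem.Chars.strip p)
      · simp only [hf, if_true]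
        have hq : q.length < v.length := by
          have := splitF_append hsf
          subst this
          simp [pvSep]
          omega
        have hrec := ih (PySem.Chars.strip q)
          (by have := strip_length_le q; omega) (strip_idem q)
        rw [hrec, strip_invariant q, hm]
        show _ = PySem.Chars.strip (PySem.Chars.join pvSep
          (if pyFloatOk (PySem.Chars.strip p) then dropNumeric (m :: ms) else p :: m :: ms))
        rw [if_pos hf]
      · rw [if_neg hf]
        show v = PySem.Chars.strip (PySem.Chars.join pvSep
          (if pyFloatOk (PySem.Chars.strip p) then dropNumeric (m :: ms) else p :: m :: ms))
        rw [if_neg hf, ← hm, ← mySplit_of_some hsf, join_mySplit, hs]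

-- ---- A's trailing loop is B's backward scan over the reversed string ----

theorem lstrip_fixed_iff (v : List Char) :
    PySem.Chars.lstrip v = v ↔ (match v with | [] => True | c :: _ => PySem.Chars.isspace c = false) := by
  cases v with
  | nil => simp [PySem.Chars.lstrip]
  | cons c t =>
    rw [lstrip_cons]
    by_cases hc : PySem.Chars.isspace c
    · simp only [if_pos hc, hc]
      constructor
      · intro h
        have := congrArg List.length h
        have hle := List.length_dropWhile_le PySem.Chars.isspace t
        simp [PySem.Chars.lstrip] at this hle
        omega
      · intro h; simp at h
    · simp [hc]

theorem lstrip_fixed_rstrip {v : List Char} (h : PySem.Chars.lstrip v = v) :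
    PySem.Chars.lstrip (PySem.Chars.rstrip v) = PySem.Chars.rstrip v := by
  rw [lstrip_rstrip_comm, h]

theorem strip_eq_rstrip_of_lstrip {v : List Char} (h : PySem.Chars.lstrip v = v) :
    PySem.Chars.strip v = PySem.Chars.rstrip v := by
  simp only [PySem.Chars.strip]
  rw [h]

theorem lstrip_strip (v : List Char) :
    PySem.Chars.lstrip (PySem.Chars.strip v) = PySem.Chars.strip v := by
  simp only [PySem.Chars.strip]
  rw [lstrip_rstrip_comm, lstrip_idem]

theorem lstrip_fixed_prefix {u : List Char} {t : List Char}
    (h : PySem.Chars.lstrip (u ++ t) = u ++ t) : PySem.Chars.lstrip u = u := by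
  cases u with
  | nil => rfl
  | cons c r =>
    rw [lstrip_fixed_iff] at h ⊢
    simpa using h

theorem revTrim_not_sep {l : List Char} (h : ∀ t, l ≠ ':' :: ':' :: t) : revTrim l = l := by
  rw [revTrim.eq_def]
  split
  · next rest => exact absurd rfl (h rest)
  · rfl

theorem rstrip_reverse (u : List Char) :
    (PySem.Chars.rstrip u).reverse = List.dropWhile PySem.Chars.isspace u.reverse := by
  simp [PySem.Chars.rstrip]

theorem trailTrim_eq_revTrim : ∀ (fuel : Nat) (v : List Char), v.length < fuel →
    PySem.Chars.lstrip v = v → trailTrim fuel v = (revTrim v.reverse).reverse := by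
  intro fuel
  induction fuel with
  | zero => intro v h _; omega
  | succ fuel ih =>
    intro v hlen hv
    by_cases hsuf : pvSep <:+ v
    · obtain ⟨u, hu⟩ := hsuf
      subst hu
      have hend : PySem.Chars.endswith (u ++ pvSep) pvSep = true :=
        (PySem.Chars.endswith_iff _ _).2 ⟨u, rfl⟩
      rw [trailTrim, if_pos hend]
      have hslice : PySem.Chars.slice (u ++ pvSep) none (some (-2)) = u := by
        rw [PySem.Chars.slice_eq_listSlice, PySem.List.slice_to_neg_ofNat _ 2 (by omega)]
        simp [pvSep]
      rw [hslice]
      have hul : PySem.Chars.lstrip u = u := by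
        have : u ++ pvSep = u ++ ':' :: [':'] := by simp [pvSep]
        exact lstrip_fixed_prefix (t := pvSep) hv
      rw [strip_eq_rstrip_of_lstrip hul]
      have hrev : (u ++ pvSep).reverse = ':' :: ':' :: u.reverse := by simp [pvSep]
      rw [hrev]
      have hrt : revTrim (':' :: ':' :: u.reverse)
          = revTrim (List.dropWhile PySem.Chars.isspace u.reverse) := by rw [revTrim]
      rw [hrt, ← rstrip_reverse]
      have hlenr : (PySem.Chars.rstrip u).length < fuel := by
        have h1 := (rstrip_prefix u).length_le
        have : u.length < (u ++ pvSep).length := by simp [pvSep]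
        omega
      exact ih (PySem.Chars.rstrip u) hlenr (lstrip_fixed_rstrip hul)
    · have hend : PySem.Chars.endswith v pvSep = false := by
        apply Bool.eq_false_iff.2; intro h
        exact hsuf ((PySem.Chars.endswith_iff _ _).1 h)
      rw [trailTrim, if_neg (by simp [hend])]
      have hns : ∀ t, v.reverse ≠ ':' :: ':' :: t := by
        intro t ht
        apply hsuf
        refine ⟨t.reverse, ?_⟩
        have := congrArg List.reverse ht
        simp [pvSep] at this ⊢
        rw [this]
      rw [revTrim_not_sep hns, List.reverse_reverse]

-- ===== VERDICT (by name: the statement is the Claim_ definition above) =====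
theorem strip_nai_weight_py_spec : Claim_equal_strip_nai_weight_py := by
  intro tag _
  show strip_nai_weight_py tag = strip_nai_weight_py_alt tag
  simp only [strip_nai_weight_py, strip_nai_weight_py_alt]
  rw [splitOn_eq_mySplit, drop_walkIdx,
    whileA_eq ((PySem.Chars.strip tag.toList).length + 1) (PySem.Chars.strip tag.toList)
      (by omega) (strip_idem tag.toList)]
  rw [trailTrim_eq_revTrim _ _ (by omega) (lstrip_strip _)]
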